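-- pv_equiv track=rewrite | github.com/araylimIT2021/lab5 | main.py | reduce_operation
-- ===== SOURCE A (Python) =====
-- def reduce_operation(mapped_data):
--     reduced_data = dict()
--     for phone_number, (call_duration, count) in mapped_data:
--         if phone_number not in reduced_data:
--             reduced_data[phone_number] = (call_duration, count)
--         else:
--             existing_call_duration, existing_count = reduced_data[phone_number]
--             reduced_data[phone_number] = (existing_call_duration + call_duration, existing_count + count)
--     return reduced_data
-- ===== SOURCE B (Python) =====
-- def reduce_operation(mapped_data):
--     # Group first, then aggregate: build an index phone -> list of (duration, count),
--     # then sum each group component-wise in a second pass.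
--     index = {}
--     for phone_number, pair in mapped_data:
--         index.setdefault(phone_number, []).append(pair)
--     reduced_data = {}
--     for phone_number, pairs in index.items():
--         reduced_data[phone_number] = (sum(d for d, _ in pairs), sum(c for _, c in pairs))
--     return reduced_data
-- ===== Notes on version B (the rewrite author's own statement) =====
-- stated objective: alternative
-- what changed: Replaced A's incremental running-total dict accumulation with a two-pass build-index-then-reduce decomposition: first group all (duration,count) pairs per phone via setdefault/append, then sum each group component-wise.
import Mathlib
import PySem

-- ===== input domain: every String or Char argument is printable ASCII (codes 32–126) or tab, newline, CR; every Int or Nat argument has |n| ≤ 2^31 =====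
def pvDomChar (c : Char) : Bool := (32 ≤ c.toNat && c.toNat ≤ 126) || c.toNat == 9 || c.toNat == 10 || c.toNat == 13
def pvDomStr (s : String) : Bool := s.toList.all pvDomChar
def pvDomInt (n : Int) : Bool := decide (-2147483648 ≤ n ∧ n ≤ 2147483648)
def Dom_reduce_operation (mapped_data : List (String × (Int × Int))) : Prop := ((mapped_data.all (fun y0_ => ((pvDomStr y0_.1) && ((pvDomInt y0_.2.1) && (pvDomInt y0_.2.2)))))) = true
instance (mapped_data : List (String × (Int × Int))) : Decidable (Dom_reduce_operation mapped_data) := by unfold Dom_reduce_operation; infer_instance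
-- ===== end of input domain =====

-- B groups the pairs per phone number first (setdefault/append) and sums each group in a
-- second pass, instead of A's incremental running-total accumulation; same cost, different
-- decomposition. Return-value equivalence only (neither version mutates its argument).

-- ===== PORT A =====
def reduce_operation (mapped_data : List (String × (Int × Int))) : List (String × Int × Int) :=
  let reduced_data :=
    mapped_data.foldl (fun d p =>
      if d.contains p.1 = false then
        d.insert p.1 (p.2.1, p.2.2)
      else
        -- key present, so the (0, 0) default of getD is unreachable (Python's d[k])
        let e := d.getD p.1 (0, 0)
        d.insert p.1 (e.1 + p.2.1, e.2 + p.2.2))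
      (PySem.Dict.empty : PySem.Dict String (Int × Int))
  reduced_data.items

-- ===== PORT B =====
def reduce_operation_alt (mapped_data : List (String × (Int × Int))) : List (String × Int × Int) :=
  -- index.setdefault(k, []).append(v)  ≡  index[k] = index.get(k, []) + [v]  = Dict.modify
  let index :=
    mapped_data.foldl (fun d p => d.modify p.1 [] (· ++ [p.2]))
      (PySem.Dict.empty : PySem.Dict String (List (Int × Int)))
  let reduced_data :=
    index.items.foldl (fun d q =>
      d.insert q.1 ((q.2.map (·.1)).sum, (q.2.map (·.2)).sum))
      (PySem.Dict.empty : PySem.Dict String (Int × Int))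
  reduced_data.items

-- ===== PRECONDITION & SPEC =====
def Spec_reduce_operation (mapped_data : List (String × (Int × Int))) (out : List (String × Int × Int)) : Prop := out = reduce_operation_alt mapped_data
instance (mapped_data : List (String × (Int × Int))) (out : List (String × Int × Int)) : Decidable (Spec_reduce_operation mapped_data out) := by unfold Spec_reduce_operation; infer_instance

-- ===== CLAIM (what is proved, stated in full; the proofs are below) =====
def Claim_equal_reduce_operation : Prop := ∀ (mapped_data : List (String × (Int × Int))), Dom_reduce_operation mapped_data → Spec_reduce_operation mapped_data (reduce_operation mapped_data)

-- ===== LEMMAS AND PROOFS =====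

-- A's loop body is exactly a Dict.modify with default (0, 0) (the fresh-key branch inserts
-- (0 + d, 0 + c) = (d, c)).
lemma A_body_eq_modify :
    (fun (d : PySem.Dict String (Int × Int)) (p : String × Int × Int) =>
      if d.contains p.1 = false then
        d.insert p.1 (p.2.1, p.2.2)
      else
        let e := d.getD p.1 (0, 0)
        d.insert p.1 (e.1 + p.2.1, e.2 + p.2.2))
    = (fun d p => d.modify p.1 (0, 0) (fun v => (v.1 + p.2.1, v.2 + p.2.2))) := by
  funext d p
  by_cases h : d.contains p.1
  · simp [h, PySem.Dict.modify]
  · have hc : d.contains p.1 = false := by simpa using h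
    simp [h, PySem.Dict.modify, PySem.Dict.getD_of_not_contains _ _ hc]

-- running-total fold, characterised pointwise: component-wise sums over the key's group
lemma A_getD (l : List (String × Int × Int)) (d : PySem.Dict String (Int × Int)) (k : String) :
    (l.foldl (fun d p => d.modify p.1 (0, 0) (fun v => (v.1 + p.2.1, v.2 + p.2.2))) d).getD k (0, 0)
      = ((d.getD k (0, 0)).1 + ((l.filter (fun p => p.1 == k)).map (fun p => p.2.1)).sum,
         (d.getD k (0, 0)).2 + ((l.filter (fun p => p.1 == k)).map (fun p => p.2.2)).sum) := by
  induction l generalizing d with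
  | nil => simp
  | cons x xs ih =>
      simp only [List.foldl_cons, ih, PySem.Dict.getD_modify, List.filter_cons]
      by_cases hx : x.1 = k
      · simp [hx, Prod.ext_iff]
        constructor <;> ring
      · simp [hx, (Ne.symm hx : k ≠ x.1)]

theorem reduce_operation_spec_aux (mapped_data : List (String × (Int × Int))) :
    reduce_operation mapped_data = reduce_operation_alt mapped_data := by
  unfold reduce_operation reduce_operation_alt
  rw [A_body_eq_modify]
  set dA := mapped_data.foldl (fun d p => d.modify p.1 (0, 0) (fun v => (v.1 + p.2.1, v.2 + p.2.2)))
      (PySem.Dict.empty : PySem.Dict String (Int × Int)) with hdA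
  set dB := mapped_data.foldl (fun d p => d.modify p.1 [] (· ++ [p.2]))
      (PySem.Dict.empty : PySem.Dict String (List (Int × Int))) with hdB
  have hndA : dA.keys.Nodup := by
    rw [hdA]
    exact PySem.Dict.nodup_keys_foldl_modify_key _ _ _ _ _ (by simp)
  have hndB : dB.keys.Nodup := by
    rw [hdB]
    exact PySem.Dict.nodup_keys_foldl_modify_key _ _ _ _ _ (by simp)
  have hkeys : dA.keys = dB.keys := by
    rw [hdA, hdB, PySem.Dict.keys_foldl_modify_key, PySem.Dict.keys_foldl_modify_key]
    rfl
  -- second loop of B inserts fresh distinct keys into an empty dict: it is a map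
  have hfresh : (dB.items.foldl (fun d q =>
        d.insert q.1 ((q.2.map (·.1)).sum, (q.2.map (·.2)).sum))
        (PySem.Dict.empty : PySem.Dict String (Int × Int))).items
      = PySem.Dict.empty.items
        ++ dB.items.map (fun q => (q.1, (q.2.map (·.1)).sum, (q.2.map (·.2)).sum)) := by
    exact PySem.Dict.items_foldl_insert_fresh _ _ _ _ (by simp) hndB
  rw [hfresh]
  rw [PySem.Dict.items_eq_map_keys dA hndA (0, 0), PySem.Dict.items_eq_map_keys dB hndB []]
  rw [List.map_map, hkeys]
  simp only [show (PySem.Dict.empty : PySem.Dict String (Int × Int)).items = [] from rfl,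
    List.nil_append]
  apply List.map_congr_left
  intro k hk
  simp only [Function.comp]
  rw [hdA, A_getD, hdB, PySem.Dict.getD_foldl_modify_append]
  simp [List.map_map, Function.comp_def]

-- ===== VERDICT (by name: the statement is the Claim_ definition above) =====
theorem reduce_operation_spec : Claim_equal_reduce_operation := by
  intro mapped_data _
  unfold Spec_reduce_operation
  exact reduce_operation_spec_aux mapped_data
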